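-- pv_equiv track=rewrite | github.com/rmanoni/marine-integrations | mi/instrument/nortek/driver.py | convert_bytes_to_bit_field
-- ===== SOURCE A (Python) =====
-- from mi.core.log import get_logger; log = get_logger()
--
-- def convert_bytes_to_bit_field(bytes):
--     """
--     Convert bytes to a bit field, reversing bytes in the process.
--     ie ['\x05', '\x01'] becomes [0, 0, 0, 1, 0, 1, 0, 1]
--     @param bytes an array of string literal bytes.
--     @retval an list of 1 or 0 in order
--     """
--     byte_list = list(bytes)
--     byte_list.reverse()
--     result = []
--     for byte in byte_list:
--         bin_string = bin(ord(byte))[2:].rjust(8, '0')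
--         result.extend([int(x) for x in list(bin_string)])
--     log.trace("Returning a bitfield of %s for input string: [%s]", result, bytes)
--     return result
-- ===== SOURCE B (Python) =====
-- def convert_bytes_to_bit_field(bytes):
--     """Same conversion, build-a-number-then-unpack: fold reversed bytes into one
--     big-endian integer, then expand it once into exactly 8*n bits."""
--     byte_list = list(bytes)
--     byte_list.reverse()
--     value = 0
--     for byte in byte_list:
--         value = (value << 8) | ord(byte)
--     n = len(byte_list)
--     return [(value >> i) & 1 for i in reversed(range(8 * n))]
-- ===== Notes on version B (the rewrite author's own statement) =====
-- stated objective: alternative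
-- what changed: Instead of formatting each byte to a binary string and extending the result list byte-by-byte, B folds the reversed bytes into one big-endian integer and then unpacks that integer once into exactly 8*n bits with shifts and masks.
-- outside the precondition, e.g. on convert_bytes_to_bit_field(['ab']): A raises TypeError, B raises TypeError
import Mathlib
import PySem

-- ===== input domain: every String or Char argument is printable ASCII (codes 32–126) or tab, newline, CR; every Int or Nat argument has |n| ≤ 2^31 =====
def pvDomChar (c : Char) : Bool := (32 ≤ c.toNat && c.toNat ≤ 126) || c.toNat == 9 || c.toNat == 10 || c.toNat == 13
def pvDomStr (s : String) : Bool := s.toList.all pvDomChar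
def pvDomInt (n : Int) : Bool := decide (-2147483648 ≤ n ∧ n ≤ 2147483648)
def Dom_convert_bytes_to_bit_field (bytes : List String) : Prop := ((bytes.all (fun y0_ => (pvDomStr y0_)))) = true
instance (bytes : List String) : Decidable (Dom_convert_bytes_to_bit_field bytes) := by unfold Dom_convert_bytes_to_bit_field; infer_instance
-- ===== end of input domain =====

-- B differs from A by folding the bytes into one big-endian integer and unpacking it
-- once into 8*n bits (alternative decomposition, same cost); equivalence of return values.

-- ===== PORT A =====
-- ord(byte): Pre_ restricts to single-character strings, where this headD default is unreachable.
def pvOrd (s : String) : Nat := (s.toList.headD '\x00').toNat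

-- bin(n)[2:] as a char list, msb first; fuel-structural so it reduces (fuel n suffices).
def pvBinGo : Nat → Nat → List Char
  | 0, _ => []
  | fuel + 1, n =>
    if n = 0 then []
    else pvBinGo fuel (n / 2) ++ [if n % 2 = 1 then '1' else '0']

def pvBinChars (n : Nat) : List Char := if n = 0 then ['0'] else pvBinGo n n

-- .rjust(8, '0')
def pvRjust8 (l : List Char) : List Char := List.replicate (8 - l.length) '0' ++ l

def convert_bytes_to_bit_field (bytes : List String) : List Int :=
  let byte_list := bytes.reverse
  byte_list.foldl
    (fun result byte =>
      result ++ ((pvRjust8 (pvBinChars (pvOrd byte))).map (fun x => (x.toNat : Int) - 48)))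
    []

-- ===== PORT B =====
def convert_bytes_to_bit_field_alt (bytes : List String) : List Int :=
  let byte_list := bytes.reverse
  let value := byte_list.foldl (fun v byte => (v <<< 8) ||| pvOrd byte) 0
  (List.range (8 * byte_list.length)).reverse.map (fun i => (((value >>> i) &&& 1 : Nat) : Int))

-- ===== PRECONDITION & SPEC =====
-- Pre_ excludes exactly the inputs where A raises TypeError: ord() needs single-character strings.
def Pre_convert_bytes_to_bit_field (bytes : List String) : Prop :=
  ∀ s ∈ bytes, s.toList.length = 1
instance (bytes : List String) : Decidable (Pre_convert_bytes_to_bit_field bytes) := by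
  unfold Pre_convert_bytes_to_bit_field; infer_instance
def pvWitness_convert_bytes_to_bit_field : List String := ["A", "!"]

def Spec_convert_bytes_to_bit_field (bytes : List String) (out : List Int) : Prop := out = convert_bytes_to_bit_field_alt bytes
instance (bytes : List String) (out : List Int) : Decidable (Spec_convert_bytes_to_bit_field bytes out) := by unfold Spec_convert_bytes_to_bit_field; infer_instance

-- ===== CLAIM (what is proved, stated in full; the proofs are below) =====
def Claim_equal_convert_bytes_to_bit_field : Prop := ∀ (bytes : List String), Dom_convert_bytes_to_bit_field bytes → Pre_convert_bytes_to_bit_field bytes → Spec_convert_bytes_to_bit_field bytes (convert_bytes_to_bit_field bytes)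

-- ===== LEMMAS AND PROOFS =====

-- the 8 bits of o, msb first, as div/mod arithmetic
def pvBits8 (o : Nat) : List Int :=
  (List.range 8).reverse.map (fun j => ((o / 2 ^ j % 2 : Nat) : Int))

set_option maxRecDepth 10000 in
theorem pvBits8_eq_A (o : Nat) (h : o < 256) :
    (pvRjust8 (pvBinChars o)).map (fun x => (x.toNat : Int) - 48) = pvBits8 o := by
  have : ∀ m : Fin 256,
      (pvRjust8 (pvBinChars m.val)).map (fun x => (x.toNat : Int) - 48) = pvBits8 m.val := by
    decide
  exact this ⟨o, h⟩

theorem pvF_eq (v o : Nat) (h : o < 256) : (v <<< 8) ||| o = v * 256 + o := by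
  rw [← Nat.shiftLeft_add_eq_or_of_lt (show o < 2 ^ 8 by norm_num; omega), Nat.shiftLeft_eq]

theorem pvFold_init (os : List Nat) (h : ∀ o ∈ os, o < 256) (v : Nat) :
    os.foldl (fun v o => (v <<< 8) ||| o) v
      = v * 256 ^ os.length + os.foldl (fun v o => (v <<< 8) ||| o) 0 := by
  induction os generalizing v with
  | nil => simp
  | cons o os ih =>
    have ho : o < 256 := h o (by simp)
    have h' : ∀ x ∈ os, x < 256 := fun x hx => h x (by simp [hx])
    simp only [List.foldl_cons, pvF_eq _ _ ho, List.length_cons]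
    rw [ih h' (v * 256 + o), ih h' (0 * 256 + o)]
    ring

theorem pvFold_lt (os : List Nat) (h : ∀ o ∈ os, o < 256) :
    os.foldl (fun v o => (v <<< 8) ||| o) 0 < 256 ^ os.length := by
  induction os with
  | nil => simp
  | cons o os ih =>
    have ho : o < 256 := h o (by simp)
    have h' : ∀ x ∈ os, x < 256 := fun x hx => h x (by simp [hx])
    have hb := ih h'
    simp only [List.foldl_cons, pvF_eq _ _ ho, List.length_cons]
    rw [pvFold_init os h' (0 * 256 + o)]
    calc (0 * 256 + o) * 256 ^ os.length + os.foldl (fun v o => (v <<< 8) ||| o) 0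
        < (o + 1) * 256 ^ os.length := by
          simp only [Nat.zero_mul, Nat.zero_add, Nat.add_mul, Nat.one_mul]; omega
      _ ≤ 256 * 256 ^ os.length := Nat.mul_le_mul_right _ (by omega)
      _ = 256 ^ (os.length + 1) := by rw [pow_succ]; ring

theorem pv256pow (k : Nat) : (256 : Nat) ^ k = 2 ^ (8 * k) := by
  rw [pow_mul]; norm_num

theorem pvMain (os : List Nat) (h : ∀ o ∈ os, o < 256) :
    (List.range (8 * os.length)).reverse.map
        (fun i => ((os.foldl (fun v o => (v <<< 8) ||| o) 0 / 2 ^ i % 2 : Nat) : Int))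
      = os.flatMap pvBits8 := by
  induction os with
  | nil => simp
  | cons o os ih =>
    have ho : o < 256 := h o (by simp)
    have h' : ∀ x ∈ os, x < 256 := fun x hx => h x (by simp [hx])
    have hb : os.foldl (fun v o => (v <<< 8) ||| o) 0 < 2 ^ (8 * os.length) := by
      rw [← pv256pow]; exact pvFold_lt os h'
    have hv : (o :: os).foldl (fun v o => (v <<< 8) ||| o) 0
        = o * 2 ^ (8 * os.length) + os.foldl (fun v o => (v <<< 8) ||| o) 0 := by
      simp only [List.foldl_cons, pvF_eq _ _ ho]
      rw [pvFold_init os h' (0 * 256 + o), pv256pow]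
      ring
    set b := os.foldl (fun v o => (v <<< 8) ||| o) 0 with hbdef
    set k := os.length with hkdef
    have hlen : 8 * (o :: os).length = 8 * k + 8 := by simp [hkdef]; ring
    rw [hlen, hv, List.range_add, List.reverse_append, List.map_append, List.flatMap_cons]
    congr 1
    · -- the top 8 bits are pvBits8 o
      rw [List.map_reverse, List.map_map, pvBits8, List.map_reverse]
      congr 1
      apply List.map_congr_left
      intro j _
      have hdiv : (o * 2 ^ (8 * k) + b) / 2 ^ (8 * k + j) = o / 2 ^ j := by
        rw [pow_add, ← Nat.div_div_eq_div_mul]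
        congr 1
        rw [Nat.mul_comm o, Nat.mul_add_div (Nat.two_pow_pos _),
          Nat.div_eq_of_lt hb]
        omega
      simpa using congrArg (fun n : Nat => ((n % 2 : Nat) : Int)) hdiv
    · -- the low 8*k bits are the tail's bits
      rw [← ih h']
      apply List.map_congr_left
      intro i hi
      have hik : i < 8 * k := List.mem_range.mp (List.mem_reverse.mp hi)
      have hsplit : o * 2 ^ (8 * k) = 2 ^ i * (o * 2 ^ (8 * k - i)) := by
        have h2 : (2 : Nat) ^ (8 * k) = 2 ^ i * 2 ^ (8 * k - i) := by
          rw [← pow_add]; congr 1; omega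
        rw [h2]; ring
      have hdiv : (o * 2 ^ (8 * k) + b) / 2 ^ i = o * 2 ^ (8 * k - i) + b / 2 ^ i := by
        rw [hsplit, Nat.mul_add_div (Nat.two_pow_pos _)]
      have heven : o * 2 ^ (8 * k - i) % 2 = 0 := by
        rw [show 8 * k - i = (8 * k - i - 1) + 1 from by omega, pow_succ, ← mul_assoc]
        exact Nat.mul_mod_left _ 2
      have hmod : (o * 2 ^ (8 * k) + b) / 2 ^ i % 2 = b / 2 ^ i % 2 := by
        rw [hdiv]; omega
      simpa using congrArg (fun n : Nat => (n : Int)) hmod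

theorem pvOrd_lt (bytes : List String) (hd : Dom_convert_bytes_to_bit_field bytes) :
    ∀ s ∈ bytes, pvOrd s < 256 := by
  intro s hs
  have hstr : pvDomStr s = true := by
    have := List.all_eq_true.mp hd s hs
    simpa using this
  unfold pvOrd
  cases hcl : s.toList with
  | nil => simp
  | cons c cs =>
    have hall : pvDomChar c = true ∧ ∀ x ∈ cs, pvDomChar x = true := by
      simpa [pvDomStr, hcl] using hstr
    have hc := hall.1
    unfold pvDomChar at hc
    simp only [List.headD]
    simp only [Bool.or_eq_true, Bool.and_eq_true, decide_eq_true_eq, beq_iff_eq] at hc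
    omega

-- ===== VERDICT (by name: the statement is the Claim_ definition above) =====
theorem convert_bytes_to_bit_field_spec : Claim_equal_convert_bytes_to_bit_field := by
  intro bytes hdom _hpre
  unfold Spec_convert_bytes_to_bit_field convert_bytes_to_bit_field convert_bytes_to_bit_field_alt
  have hordR : ∀ s ∈ bytes.reverse, pvOrd s < 256 := fun s hs =>
    pvOrd_lt bytes hdom s (List.mem_reverse.mp hs)
  have hord' : ∀ o ∈ bytes.reverse.map pvOrd, o < 256 := by
    intro o hoo
    obtain ⟨s, hs, rfl⟩ := List.mem_map.mp hoo
    exact hordR s hs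
  rw [PySem.List.foldl_append_eq_flatMap, List.nil_append]
  have hA : bytes.reverse.flatMap
      (fun byte => (pvRjust8 (pvBinChars (pvOrd byte))).map (fun x => (x.toNat : Int) - 48))
      = (bytes.reverse.map pvOrd).flatMap pvBits8 := by
    rw [List.flatMap_map]
    apply List.flatMap_congr
    intro s hs
    exact pvBits8_eq_A (pvOrd s) (hordR s hs)
  rw [hA, ← pvMain (bytes.reverse.map pvOrd) hord']
  simp only [List.foldl_map, List.length_map, Nat.shiftRight_eq_div_pow, Nat.and_one_is_mod]
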